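-- pv_equiv track=rewrite | github.com/Davidpm02/PYTHON___Retos_Programacion_MoureDev-2023 | Heterograma, isograma y pangrama [009]/challenge.py | is_heterogram
-- ===== SOURCE A (Python) =====
-- from collections import Counter
--
-- def is_heterogram(s:str) -> bool:
--     """
--     Se encarga de comprobar si la cadena recibida es un
--     heterograma o no.
--
--     Según su definición, un heterograma es una palabra o
--     frase que no contiene ninguna letra repetida.
--
--     params:
--         s (str)
--
--     returns:
--         bool
--     """
--
--     # Elimino los espacios de la cadena
--     s = s.replace(" ", "")
--
--     try:
--         chars_counter = Counter(s)
--         assert all((value == 1) for value in list(chars_counter.values()))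
--         return True
--     except AssertionError:
--         return False
-- ===== SOURCE B (Python) =====
-- def is_heterogram(s: str) -> bool:
--     t = sorted(s.replace(" ", ""))
--     return all(a != b for a, b in zip(t, t[1:]))
-- ===== Notes on version B (the rewrite author's own statement) =====
-- stated objective: alternative
-- what changed: Replaced A's hash-based Counter-then-verify-all-counts-equal-1 check with a comparison-sort of the characters followed by an adjacent-pair inequality scan (duplicates become neighbours after sorting).
import Mathlib
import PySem

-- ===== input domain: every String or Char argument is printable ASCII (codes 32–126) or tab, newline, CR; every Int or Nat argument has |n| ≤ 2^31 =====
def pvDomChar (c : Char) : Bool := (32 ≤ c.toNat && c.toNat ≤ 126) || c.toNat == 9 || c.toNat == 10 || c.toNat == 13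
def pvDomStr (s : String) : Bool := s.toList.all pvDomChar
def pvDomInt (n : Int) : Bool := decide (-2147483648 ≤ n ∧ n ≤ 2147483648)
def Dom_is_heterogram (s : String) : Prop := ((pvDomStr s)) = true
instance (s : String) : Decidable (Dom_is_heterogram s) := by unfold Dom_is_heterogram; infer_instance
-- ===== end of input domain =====

-- B replaces A's Counter-then-verify-all-counts check with a sort of the characters followed by an adjacent-pair inequality scan (objective: alternative).

-- ===== PORT A =====
def is_heterogram (s : String) : Bool :=
  -- s = s.replace(" ", "")
  let s' := PySem.Str.replace s " " ""
  -- chars_counter = Counter(s); assert all(value == 1 for value in chars_counter.values())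
  let chars_counter : PySem.Dict Char Int := PySem.Dict.counter s'.toList
  if chars_counter.values.all (fun value => value == (1 : Int)) then true else false

-- ===== PORT B =====
def is_heterogram_alt (s : String) : Bool :=
  -- t = sorted(s.replace(" ", ""))
  let t := PySem.List.sorted (PySem.Str.replace s " " "").toList (fun c => c) false
  -- all(a != b for a, b in zip(t, t[1:]))
  (t.zip (PySem.List.slice t (some 1) none)).all (fun p => p.1 != p.2)

-- ===== PRECONDITION & SPEC =====
def Spec_is_heterogram (s : String) (out : Bool) : Prop := out = is_heterogram_alt s
instance (s : String) (out : Bool) : Decidable (Spec_is_heterogram s out) := by unfold Spec_is_heterogram; infer_instance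

-- ===== CLAIM =====
def Claim_equal_is_heterogram : Prop := ∀ (s : String), Dom_is_heterogram s → Spec_is_heterogram s (is_heterogram s)

-- ===== LEMMAS AND PROOFS =====

theorem counter_all_one_eq_nodup (l : List Char) :
    ((PySem.Dict.counter l : PySem.Dict Char Int).values.all (fun value => value == (1 : Int)))
      = decide l.Nodup := by
  rw [PySem.Dict.values_eq_map_keys _ (PySem.Dict.nodup_keys_counter l) 0]
  rw [Bool.eq_iff_iff, decide_eq_true_iff]
  simp only [List.all_map, List.all_eq_true, PySem.Dict.keys_counter,
    PySem.Dict.getD_counter, PySem.Set.mem_ofList]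
  constructor
  · intro h
    rw [List.nodup_iff_count_eq_one]
    intro a ha
    have := h a ha
    simp only [Function.comp_apply, beq_iff_eq] at this
    exact_mod_cast this
  · intro h a ha
    simp only [Function.comp_apply, beq_iff_eq]
    exact_mod_cast List.nodup_iff_count_eq_one.mp h a ha

theorem zip_tail_all_ne_eq_chain (t : List Char) :
    (t.zip (PySem.List.slice t (some 1) none)).all (fun p => p.1 != p.2)
      = decide (t.IsChain (fun a b => a ≠ b)) := by
  rw [PySem.List.slice_from_one]
  induction t with
  | nil => simp
  | cons a r ih =>
      cases r with
      | nil => simp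
      | cons b r' =>
          simp only [List.tail_cons, List.zip_cons_cons, List.all_cons,
            List.isChain_cons_cons, Bool.decide_and]
          simp only [List.tail_cons] at ih
          rw [ih]
          by_cases hab : a = b
          · simp [hab]
          · simp [hab]

theorem sorted_isChain_ne_of_nodup_aux (t : List Char)
    (hle : t.Pairwise (fun a b => a ≤ b)) (hch : t.IsChain (fun a b => a ≠ b)) :
    t.Pairwise (fun a b : Char => a < b) := by
  have hlt : t.IsChain (fun a b : Char => a < b) := by
    induction t with
    | nil => exact List.IsChain.nil
    | cons a r ih =>
        cases r with
        | nil => exact List.IsChain.singleton _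
        | cons b r' =>
            rw [List.isChain_cons_cons] at hch ⊢
            have hab : a ≤ b := (List.pairwise_cons.mp hle).1 b (by simp)
            exact ⟨lt_of_le_of_ne hab hch.1,
              ih (List.pairwise_cons.mp hle).2 hch.2⟩
  exact List.isChain_iff_pairwise.mp hlt

theorem sorted_isChain_ne_iff_nodup (l : List Char) :
    (PySem.List.sorted l (fun c => c) false).IsChain (fun a b => a ≠ b) ↔ l.Nodup := by
  have hperm : (PySem.List.sorted l (fun c => c) false).Perm l :=
    PySem.List.sorted_perm l (fun c => c) false
  have hle : (PySem.List.sorted l (fun c => c) false).Pairwise (fun a b => a ≤ b) := by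
    simpa using PySem.List.sorted_pairwise l (fun c => c)
  constructor
  · intro hch
    exact hperm.nodup_iff.mp
      ((sorted_isChain_ne_of_nodup_aux _ hle hch).imp ne_of_lt)
  · intro hnd
    have hndt : (PySem.List.sorted l (fun c => c) false).Nodup := hperm.nodup_iff.mpr hnd
    exact List.Pairwise.isChain hndt

-- ===== VERDICT =====
theorem is_heterogram_spec : Claim_equal_is_heterogram := by
  intro s _
  show is_heterogram s = is_heterogram_alt s
  unfold is_heterogram is_heterogram_alt
  simp only [counter_all_one_eq_nodup, zip_tail_all_ne_eq_chain]
  split_ifs with h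
  · exact (decide_eq_true
      ((sorted_isChain_ne_iff_nodup _).mpr (of_decide_eq_true h))).symm
  · exact (decide_eq_false (fun hc =>
      h (decide_eq_true ((sorted_isChain_ne_iff_nodup _).mp hc)))).symm
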